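-- pv_equiv track=rewrite | github.com/liangxuCHEN/linshi_web | myApi/package_tools.py | find_the_same_position
-- ===== SOURCE A (Python) =====
-- def find_the_same_position(positions, shapes):
--     # 初始化，默认每个都不一样，数量都是1
--     num_list = [1] * len(positions)
--     for i in range(len(positions)-1, 0, -1):
--         for j in range(0, i):
--             if positions[i] == positions[j] and num_list[j] != 0:
--                 num_list[i] += 1
--                 num_list[j] = 0
--     return num_list
-- ===== SOURCE B (Python) =====
-- def find_the_same_position(positions, shapes):
--     # One O(n) pass to count occurrences, one reverse pass: the last
--     # occurrence of each value gets its total count, all others get 0.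
--     cnt = {}
--     for p in positions:
--         cnt[p] = cnt.get(p, 0) + 1
--     seen = set()
--     out = []
--     for p in reversed(positions):
--         if p in seen:
--             out.append(0)
--         else:
--             seen.add(p)
--             out.append(cnt[p])
--     out.reverse()
--     return out
-- ===== Notes on version B (the rewrite author's own statement) =====
-- stated objective: faster
-- what changed: Replaced the quadratic nested index loops (each index scanning and zeroing all earlier equal positions) by one counting pass with a dict plus one reverse pass with a seen-set that puts the total count at the last occurrence and 0 elsewhere.
import Mathlib
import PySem

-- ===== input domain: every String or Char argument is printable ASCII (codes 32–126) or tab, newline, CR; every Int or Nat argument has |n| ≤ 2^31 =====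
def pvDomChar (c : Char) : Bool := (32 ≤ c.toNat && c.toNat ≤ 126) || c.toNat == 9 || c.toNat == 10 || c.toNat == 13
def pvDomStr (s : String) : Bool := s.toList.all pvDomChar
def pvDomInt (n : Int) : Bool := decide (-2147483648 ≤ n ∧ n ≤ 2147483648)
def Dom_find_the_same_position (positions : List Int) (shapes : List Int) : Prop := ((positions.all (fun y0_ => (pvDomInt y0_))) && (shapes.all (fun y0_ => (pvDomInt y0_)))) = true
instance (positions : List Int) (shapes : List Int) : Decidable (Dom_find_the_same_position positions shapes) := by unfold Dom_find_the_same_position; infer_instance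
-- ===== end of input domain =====

-- B replaces A's quadratic nested index loops by one O(n) counting pass (dict) plus one
-- reverse pass with a seen-set: the last occurrence of each value gets its total count,
-- every other position gets 0. Proved equal to A on all inputs.


-- ===== PORT A =====
-- num_list = [1]*len(positions); for i in range(len(positions)-1, 0, -1):
--   for j in range(0, i): if positions[i] == positions[j] and num_list[j] != 0: ...
def find_the_same_position (positions : List Int) (shapes : List Int) : List Int :=
  (PySem.List.pyRange ((positions.length : Int) - 1) 0 (-1)).foldl
    (fun num i =>
      (PySem.List.pyRange 0 i 1).foldl
        (fun num j =>
          if PySem.List.pyGetD positions i 0 = PySem.List.pyGetD positions j 0 ∧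
              PySem.List.pyGetD num j 0 ≠ 0 then
            (List.set (num.set i.toNat (PySem.List.pyGetD num i 0 + 1)) j.toNat 0)
          else num)
        num)
    (List.replicate positions.length 1)

-- ===== PORT B =====
-- cnt[p] = cnt.get(p, 0) + 1 over positions; then a reverse pass with a seen-set
-- appending cnt[p] at a first-met (= last) occurrence and 0 otherwise; out.reverse().
def find_the_same_position_alt (positions : List Int) (shapes : List Int) : List Int :=
  let cnt : PySem.Dict Int Int :=
    positions.foldl (fun d p => d.insert p (d.getD p 0 + 1)) PySem.Dict.empty
  let st :=
    positions.reverse.foldl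
      (fun (st : PySem.Set Int × List Int) p =>
        if PySem.Set.contains st.1 p then (st.1, st.2 ++ [0])
        else (PySem.Set.add st.1 p, st.2 ++ [cnt.getD p 0]))
      (PySem.Set.empty, [])
  st.2.reverse

-- ===== PRECONDITION & SPEC =====
def Spec_find_the_same_position (positions : List Int) (shapes : List Int) (out : List Int) : Prop := out = find_the_same_position_alt positions shapes
instance (positions : List Int) (shapes : List Int) (out : List Int) : Decidable (Spec_find_the_same_position positions shapes out) := by unfold Spec_find_the_same_position; infer_instance

-- ===== CLAIM (what is proved, stated in full; the proofs are below) =====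
def Claim_equal_find_the_same_position : Prop := ∀ (positions : List Int) (shapes : List Int), Dom_find_the_same_position positions shapes → Spec_find_the_same_position positions shapes (find_the_same_position positions shapes)

-- ===== LEMMAS AND PROOFS =====
def stepA (pos : List Int) (i : Nat) (num : List Int) (j : Nat) : List Int :=
  if pos.getD i 0 = pos.getD j 0 ∧ num.getD j 0 ≠ 0 then
    (num.set i (num.getD i 0 + 1)).set j 0
  else num

def innerA (pos : List Int) (i : Nat) (num : List Int) : List Int :=
  (List.range i).foldl (stepA pos i) num

lemma bridge_inner (pos : List Int) (i : Nat) (num : List Int) :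
    (PySem.List.pyRange 0 (i : Int) 1).foldl
      (fun num j =>
        if PySem.List.pyGetD pos (i : Int) 0 = PySem.List.pyGetD pos j 0 ∧
            PySem.List.pyGetD num j 0 ≠ 0 then
          (List.set (num.set (i : Int).toNat (PySem.List.pyGetD num (i : Int) 0 + 1)) j.toNat 0)
        else num) num
    = innerA pos i num := by
  rw [PySem.List.pyRange_one, List.foldl_map]
  unfold innerA
  simp only [sub_zero, Int.toNat_natCast]
  congr 1
  funext num k
  simp [stepA, PySem.List.pyGetD_natCast]

def outerA (pos : List Int) : Nat → List Int → List Int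
  | 0, num => num
  | i+1, num => outerA pos i (innerA pos (i+1) num)

lemma bridge_outer (pos : List Int) (m : Nat) :
    ∀ num : List Int,
    (PySem.List.pyRange (m : Int) 0 (-1)).foldl
      (fun num i =>
        (PySem.List.pyRange 0 i 1).foldl
          (fun num j =>
            if PySem.List.pyGetD pos i 0 = PySem.List.pyGetD pos j 0 ∧
                PySem.List.pyGetD num j 0 ≠ 0 then
              (List.set (num.set i.toNat (PySem.List.pyGetD num i 0 + 1)) j.toNat 0)
            else num)
          num) num
    = outerA pos m num := by
  induction m with
  | zero =>
    intro num
    rw [show ((0:Nat):Int) = 0 by norm_num, PySem.List.pyRange_neg_one_eq_nil (le_refl 0)]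
    rfl
  | succ m ih =>
    intro num
    rw [PySem.List.pyRange_neg_one_cons (by positivity)]
    rw [show ((m+1:Nat):Int) - 1 = (m:Int) by push_cast; ring]
    simp only [List.foldl_cons]
    rw [bridge_inner pos (m+1) num, ih]
    rfl

lemma find_eq_outerA (pos shapes : List Int) :
    find_the_same_position pos shapes
      = outerA pos (pos.length - 1) (List.replicate pos.length 1) := by
  unfold find_the_same_position
  rcases Nat.eq_zero_or_pos pos.length with h | h
  · rw [show ((pos.length : Int) - 1) = -1 by omega,
      PySem.List.pyRange_neg_one_eq_nil (by omega), h]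
    rfl
  · rw [show ((pos.length : Int) - 1) = ((pos.length - 1 : Nat) : Int) by omega]
    exact bridge_outer pos (pos.length - 1) _

lemma getD_append_left' (xs ys : List Int) (i : Nat) (h : i < xs.length) :
    (xs ++ ys).getD i 0 = xs.getD i 0 := by
  simp [List.getD, List.getElem?_append_left h]

lemma getD_append_right' (xs ys : List Int) (k : Nat) :
    (xs ++ ys).getD (xs.length + k) 0 = ys.getD k 0 := by
  simp [List.getD, List.getElem?_append_right (by omega : xs.length ≤ xs.length + k)]

lemma stepA_length (pos : List Int) (i : Nat) (num : List Int) (j : Nat) :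
    (stepA pos i num j).length = num.length := by
  unfold stepA; split <;> simp

lemma foldl_stepA_length (pos : List Int) (i : Nat) (js : List Nat) :
    ∀ num : List Int, (js.foldl (stepA pos i) num).length = num.length := by
  induction js with
  | nil => intro num; rfl
  | cons j js ih => intro num; simp only [List.foldl_cons]; rw [ih, stepA_length]

lemma stepA_prefix (xs tail num rest : List Int) (i j : Nat)
    (hj : j < xs.length) (hi : i < xs.length) (hlen : num.length = xs.length) :
    stepA (xs ++ tail) i (num ++ rest) j = stepA xs i num j ++ rest := by
  unfold stepA
  rw [getD_append_left' _ _ _ hi, getD_append_left' _ _ _ hj,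
    getD_append_left' _ _ _ (by omega), getD_append_left' _ _ _ (by omega)]
  split
  · rw [List.set_append_left _ _ (by omega), List.set_append_left _ _ (by simp; omega)]
  · rfl

lemma foldl_stepA_prefix (xs tail rest : List Int) (i : Nat) :
    ∀ (js : List Nat) (num : List Int), (∀ j ∈ js, j < xs.length) → i < xs.length →
    num.length = xs.length →
    js.foldl (stepA (xs ++ tail) i) (num ++ rest) = js.foldl (stepA xs i) num ++ rest := by
  intro js
  induction js with
  | nil => intro num _ _ _; rfl
  | cons j js ih =>
    intro num hjs hi hlen
    simp only [List.foldl_cons]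
    rw [stepA_prefix xs tail num rest i j (hjs j (by simp)) hi hlen,
      ih _ (fun j hj => hjs j (by simp [hj])) hi (by rw [stepA_length]; exact hlen)]

lemma innerA_append (xs tail num rest : List Int) (i : Nat)
    (hi : i < xs.length) (hlen : num.length = xs.length) :
    innerA (xs ++ tail) i (num ++ rest) = innerA xs i num ++ rest := by
  unfold innerA
  exact foldl_stepA_prefix xs tail rest i _ num
    (fun j hj => by have := List.mem_range.mp hj; omega) hi hlen

lemma outerA_append (xs tail rest : List Int) :
    ∀ (k : Nat) (num : List Int), k < xs.length → num.length = xs.length →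
    outerA (xs ++ tail) k (num ++ rest) = outerA xs k num ++ rest := by
  intro k
  induction k with
  | zero => intro num _ _; rfl
  | succ k ih =>
    intro num hk hlen
    show outerA (xs ++ tail) k (innerA (xs ++ tail) (k+1) (num ++ rest)) = _
    rw [innerA_append xs tail num rest (k+1) hk hlen,
      ih _ (by omega) (by unfold innerA; rw [foldl_stepA_length]; exact hlen)]
    rfl

def initOf (f : Int → Bool) (xs : List Int) : List Int :=
  xs.map (fun v => if f v then (0 : Int) else 1)

lemma initOf_append (f : Int → Bool) (xs ys : List Int) :
    initOf f (xs ++ ys) = initOf f xs ++ initOf f ys := by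
  simp [initOf]

lemma length_initOf (f : Int → Bool) (xs : List Int) : (initOf f xs).length = xs.length := by
  simp [initOf]

lemma inner_go (f : Int → Bool) :
    ∀ (ys tl rest : List Int) (k : Nat), k < rest.length →
    (List.range ys.length).foldl (stepA (ys ++ tl) (ys.length + k)) (initOf f ys ++ rest)
    = initOf (fun v => f v || decide (v = tl.getD k 0)) ys ++
        rest.set k (rest.getD k 0 +
          if f (tl.getD k 0) then 0 else (ys.count (tl.getD k 0) : Int)) := by
  intro ys
  induction ys using List.reverseRecOn with
  | nil =>
    intro tl rest k hk
    simp only [List.length_nil, List.range_zero, List.foldl_nil, initOf, List.map_nil,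
      List.nil_append, List.count_nil]
    have h0 : (if f (tl.getD k 0) then (0:Int) else ((0:Nat):Int)) = 0 := by split <;> simp
    rw [h0, add_zero, List.getD_eq_getElem rest 0 hk, List.set_getElem_self]
  | append_singleton zs z ih =>
    intro tl rest k hk
    have hlen : (zs ++ [z]).length = zs.length + 1 := by simp
    rw [hlen, List.range_succ, List.foldl_append, initOf_append,
      show (zs.length + 1 + k) = zs.length + (k + 1) by omega,
      show (zs ++ [z]) ++ tl = zs ++ (z :: tl) by simp,
      show initOf f zs ++ initOf f [z] ++ rest
        = initOf f zs ++ ((if f z then (0:Int) else 1) :: rest) by simp [initOf],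
      ih (z :: tl) ((if f z then (0:Int) else 1) :: rest) (k+1) (by simp; omega)]
    simp only [List.foldl_cons, List.foldl_nil, List.getD_cons_succ]
    set w := tl.getD k 0 with hw
    set gz : Int := if f z then (0:Int) else 1 with hgz
    set X : Int := rest.getD k 0 + if f w then 0 else (zs.count w : Int) with hX
    rw [show ((gz :: rest).set (k+1) X) = gz :: rest.set k X by simp]
    -- now apply the last step at j = zs.length
    unfold stepA
    rw [show zs.length + (k+1) = zs.length + (k+1) from rfl]
    rw [getD_append_right' zs (z :: tl) (k+1), List.getD_cons_succ]
    have hposj : (zs ++ z :: tl).getD zs.length 0 = z := by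
      have := getD_append_right' zs (z :: tl) 0
      simpa using this
    rw [hposj]
    have hstj : (initOf (fun v => f v || decide (v = w)) zs ++ (gz :: rest.set k X)).getD zs.length 0 = gz := by
      have := getD_append_right' (initOf (fun v => f v || decide (v = w)) zs) (gz :: rest.set k X) 0
      simpa [length_initOf] using this
    rw [hstj, hw]
    by_cases hzw : tl.getD k 0 = z
    · by_cases hfz : f z
      · -- gz = 0, condition false
        have : ¬ (tl.getD k 0 = z ∧ gz ≠ 0) := by simp [hgz, hfz]
        rw [if_neg this]
        have hfw : f w = true := by rw [← hzw] at hfz; exact hfz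
        rw [initOf_append]
        have h1 : initOf (fun v => f v || decide (v = w)) [z] = [gz] := by
          simp [initOf, hgz, hfz]
        rw [h1, List.append_assoc, List.singleton_append]
        have hXX : X = rest.getD k 0 := by rw [hX, hfw]; simp
        rw [hXX, hfw]
        simp
      · -- fires
        have hcond : (tl.getD k 0 = z ∧ gz ≠ 0) := ⟨hzw, by simp [hgz, hfz]⟩
        rw [if_pos hcond]
        have hfw : f w = false := by rw [hw, hzw]; simp [hfz]
        -- getD at i
        have hgi : (initOf (fun v => f v || decide (v = w)) zs ++ (gz :: rest.set k X)).getD (zs.length + (k+1)) 0 = X := by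
          rw [show zs.length + (k+1) = (initOf (fun v => f v || decide (v = w)) zs).length + (k+1) by rw [length_initOf],
            getD_append_right', List.getD_cons_succ]
          simp [List.getD, List.getElem?_set_self, hk]
        rw [hgi]
        rw [List.set_append_right _ _ (by rw [length_initOf]; omega)]
        rw [show zs.length + (k+1) - (initOf (fun v => f v || decide (v = w)) zs).length = k+1 by rw [length_initOf]; omega]
        rw [show ((gz :: rest.set k X).set (k+1) (X + 1)) = gz :: (rest.set k X).set k (X+1) by simp]
        rw [List.set_set]
        rw [List.set_append_right _ _ (by rw [length_initOf])]
        rw [show zs.length - (initOf (fun v => f v || decide (v = w)) zs).length = 0 by rw [length_initOf]; omega]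
        rw [show ((gz :: rest.set k (X+1)).set 0 0) = (0:Int) :: rest.set k (X+1) by simp]
        rw [initOf_append]
        have hzw' : z = w := by rw [hw]; exact hzw.symm
        have h1 : initOf (fun v => f v || decide (v = w)) [z] = [0] := by
          simp [initOf, hzw']
        rw [h1, List.append_assoc, List.singleton_append]
        have h2 : ((zs ++ [z]).count w : Int) = (zs.count w : Int) + 1 := by
          rw [List.count_append]
          have : List.count w [z] = 1 := by simp [hzw']
          rw [this]; push_cast; ring
        rw [hfw] at hX ⊢
        simp only [if_neg (by simp : ¬ (false = true))] at hX ⊢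
        congr 2
        rw [hX, h2]; ring_nf
    · -- z ≠ w : condition false
      have : ¬ (tl.getD k 0 = z ∧ gz ≠ 0) := fun h => hzw h.1
      rw [if_neg this]
      rw [initOf_append]
      have hzw' : z ≠ w := by rw [hw]; exact fun h => hzw h.symm
      have h1 : initOf (fun v => f v || decide (v = w)) [z] = [gz] := by
        simp [initOf, hgz, hzw']
      rw [h1, List.append_assoc, List.singleton_append]
      have h2 : (zs ++ [z]).count w = zs.count w := by
        rw [List.count_append]
        have : List.count w [z] = 0 := by simp [hzw']
        omega
      rw [h2, hX]

lemma inner_top (f : Int → Bool) (xs : List Int) (x c : Int) :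
    innerA (xs ++ [x]) xs.length (initOf f xs ++ [c])
    = initOf (fun v => f v || decide (v = x)) xs ++
        [c + if f x then 0 else (xs.count x : Int)] := by
  have h := inner_go f xs [x] [c] 0 (by simp)
  simp only [Nat.add_zero] at h
  unfold innerA
  rw [h]
  simp [List.getD_cons_zero]

def stepB (cnt : PySem.Dict Int Int) (st : PySem.Set Int × List Int) (p : Int) :
    PySem.Set Int × List Int :=
  if PySem.Set.contains st.1 p then (st.1, st.2 ++ [0])
  else (PySem.Set.add st.1 p, st.2 ++ [cnt.getD p 0])

lemma foldl_stepB_acc (cnt : PySem.Dict Int Int) :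
    ∀ (l : List Int) (s : PySem.Set Int) (o : List Int),
    l.foldl (stepB cnt) (s, o)
      = ((l.foldl (stepB cnt) (s, [])).1, o ++ (l.foldl (stepB cnt) (s, [])).2) := by
  intro l
  induction l with
  | nil => intro s o; simp
  | cons p l ih =>
    intro s o
    simp only [List.foldl_cons]
    by_cases h : PySem.Set.contains s p = true
    · rw [show stepB cnt (s, o) p = (s, o ++ [0]) by unfold stepB; rw [if_pos h],
        show stepB cnt (s, ([]:List Int)) p = (s, [] ++ [0]) by unfold stepB; rw [if_pos h],
        ih s (o ++ [0]), ih s ([] ++ [0])]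
      simp
    · rw [show stepB cnt (s, o) p = (PySem.Set.add s p, o ++ [cnt.getD p 0]) by unfold stepB; rw [if_neg h],
        show stepB cnt (s, ([]:List Int)) p = (PySem.Set.add s p, [] ++ [cnt.getD p 0]) by unfold stepB; rw [if_neg h],
        ih _ (o ++ [cnt.getD p 0]), ih _ ([] ++ [cnt.getD p 0])]
      simp

lemma contains_add_eq (s : PySem.Set Int) (x v : Int) :
    PySem.Set.contains (PySem.Set.add s x) v
      = (PySem.Set.contains s v || decide (v = x)) := by
  by_cases h : v ∈ PySem.Set.add s x
  · rw [(PySem.Set.contains_iff _ _).mpr h]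
    rcases (PySem.Set.mem_add s x v).mp h with h' | h'
    · rw [(PySem.Set.contains_iff _ _).mpr h']; simp
    · simp [h']
  · have h1 : ¬ v ∈ s := fun hv => h ((PySem.Set.mem_add s x v).mpr (Or.inl hv))
    have h2 : ¬ v = x := fun hv => h ((PySem.Set.mem_add s x v).mpr (Or.inr hv))
    have c1 : PySem.Set.contains (PySem.Set.add s x) v = false := by
      rw [← Bool.not_eq_true]
      exact fun hc => h ((PySem.Set.contains_iff _ _).mp hc)
    have c2 : PySem.Set.contains s v = false := by
      rw [← Bool.not_eq_true]
      exact fun hc => h1 ((PySem.Set.contains_iff _ _).mp hc)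
    rw [c1, c2]
    simp [h2]

lemma core :
    ∀ (xs : List Int) (seen : PySem.Set Int) (cnt : PySem.Dict Int Int),
    (∀ v, v ∈ xs → PySem.Set.contains seen v = false → cnt.getD v 0 = (xs.count v : Int)) →
    outerA xs (xs.length - 1) (initOf (fun v => PySem.Set.contains seen v) xs)
      = ((xs.reverse.foldl (stepB cnt) (seen, [])).2).reverse := by
  intro xs
  induction xs using List.reverseRecOn with
  | nil => intro seen cnt hcnt; rfl
  | append_singleton ys x ih =>
    intro seen cnt hcnt
    rw [show (ys ++ [x]).reverse = x :: ys.reverse by simp]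
    simp only [List.foldl_cons]
    have hinit : initOf (fun v => PySem.Set.contains seen v) (ys ++ [x])
        = initOf (fun v => PySem.Set.contains seen v) ys ++
            [if PySem.Set.contains seen x then (0:Int) else 1] := by
      simp [initOf]
    have hlen1 : (ys ++ [x]).length - 1 = ys.length := by simp
    rw [hlen1, hinit]
    by_cases hx : PySem.Set.contains seen x = true
    · -- x already seen
      rw [show stepB cnt (seen, ([]:List Int)) x = (seen, [(0:Int)]) by
        unfold stepB; rw [if_pos hx]; rfl]
      rw [foldl_stepB_acc cnt ys.reverse seen [(0:Int)]]
      have hf : (fun v => PySem.Set.contains seen v || decide (v = x))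
          = (fun v => PySem.Set.contains seen v) := by
        funext v
        by_cases hvx : v = x
        · rw [hvx, hx]; simp
        · simp [hvx]
      have hcnt' : ∀ v, v ∈ ys → PySem.Set.contains seen v = false →
          cnt.getD v 0 = (ys.count v : Int) := by
        intro v hv hvs
        have hvx : v ≠ x := fun he => by rw [he] at hvs; rw [hvs] at hx; exact Bool.false_ne_true hx
        have := hcnt v (by simp [hv]) hvs
        rwa [List.count_append, show List.count v [x] = 0 by
          have hxv : x ≠ v := fun h => hvx h.symm
          simp [hxv], Nat.add_zero] at this
      rw [if_pos hx]
      rcases Nat.eq_zero_or_pos ys.length with hy0 | hyp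
      · have hys : ys = [] := List.length_eq_zero_iff.mp hy0
        subst hys
        simp [outerA, initOf]
      · obtain ⟨m, hm⟩ : ∃ m, ys.length = m + 1 := ⟨ys.length - 1, by omega⟩
        rw [hm]
        show outerA (ys ++ [x]) m (innerA (ys ++ [x]) (m+1)
          (initOf (fun v => PySem.Set.contains seen v) ys ++ [0])) = _
        rw [← hm, inner_top, hx]
        rw [outerA_append ys [x] _ m _ (by omega) (by rw [length_initOf])]
        rw [if_pos rfl, add_zero]
        rw [hf]
        rw [show m = ys.length - 1 by omega]
        rw [ih seen cnt hcnt']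
        simp
    · -- x new
      have hx' : PySem.Set.contains seen x = false := by
        rw [← Bool.not_eq_true]; exact hx
      rw [show stepB cnt (seen, ([]:List Int)) x = (PySem.Set.add seen x, [cnt.getD x 0]) by
        unfold stepB; rw [if_neg hx]; rfl]
      rw [foldl_stepB_acc cnt ys.reverse (PySem.Set.add seen x) [cnt.getD x 0]]
      have hc0 : cnt.getD x 0 = (ys.count x : Int) + 1 := by
        have := hcnt x (by simp) hx'
        rw [this, List.count_append, show List.count x [x] = 1 by simp]
        push_cast; ring
      have hf : (fun v => PySem.Set.contains seen v || decide (v = x))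
          = (fun v => PySem.Set.contains (PySem.Set.add seen x) v) := by
        funext v
        rw [contains_add_eq]
      have hcnt' : ∀ v, v ∈ ys → PySem.Set.contains (PySem.Set.add seen x) v = false →
          cnt.getD v 0 = (ys.count v : Int) := by
        intro v hv hvs
        rw [contains_add_eq] at hvs
        have h1 : PySem.Set.contains seen v = false := by
          cases hcs : PySem.Set.contains seen v
          · rfl
          · rw [hcs] at hvs; simp at hvs
        have h2 : v ≠ x := by
          intro he
          rw [he] at hvs; simp at hvs
        have := hcnt v (by simp [hv]) h1
        rwa [List.count_append, show List.count v [x] = 0 by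
          have hxv : x ≠ v := fun h => h2 h.symm
          simp [hxv], Nat.add_zero] at this
      rw [if_neg hx]
      rcases Nat.eq_zero_or_pos ys.length with hy0 | hyp
      · have hys : ys = [] := List.length_eq_zero_iff.mp hy0
        subst hys
        simp [outerA, initOf, hc0]
      · obtain ⟨m, hm⟩ : ∃ m, ys.length = m + 1 := ⟨ys.length - 1, by omega⟩
        rw [hm]
        show outerA (ys ++ [x]) m (innerA (ys ++ [x]) (m+1)
          (initOf (fun v => PySem.Set.contains seen v) ys ++ [1])) = _
        rw [← hm, inner_top, hx']
        rw [outerA_append ys [x] _ m _ (by omega) (by rw [length_initOf])]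
        rw [if_neg (by simp)]
        rw [hf]
        rw [show m = ys.length - 1 by omega]
        rw [ih (PySem.Set.add seen x) cnt hcnt']
        simp [hc0]
        ring_nf

lemma a_eq_b (positions shapes : List Int) :
    find_the_same_position positions shapes = find_the_same_position_alt positions shapes := by
  rw [find_eq_outerA]
  have hrep : List.replicate positions.length (1:Int)
      = initOf (fun v => PySem.Set.contains PySem.Set.empty v) positions := by
    simp [initOf, PySem.Set.contains_eq_listContains, PySem.Set.empty, List.map_const']
  rw [hrep]
  rw [core positions PySem.Set.empty (PySem.Dict.counter positions)
    (fun v _ _ => PySem.Dict.getD_counter positions v)]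
  show _ = (let cnt : PySem.Dict Int Int :=
      positions.foldl (fun d p => d.insert p (d.getD p 0 + 1)) PySem.Dict.empty
    let st := positions.reverse.foldl
      (fun (st : PySem.Set Int × List Int) p =>
        if PySem.Set.contains st.1 p then (st.1, st.2 ++ [0])
        else (PySem.Set.add st.1 p, st.2 ++ [cnt.getD p 0]))
      (PySem.Set.empty, [])
    st.2.reverse)
  rw [show (positions.foldl (fun d p => d.insert p (d.getD p 0 + 1)) PySem.Dict.empty)
    = PySem.Dict.counter positions from PySem.Dict.foldl_insert_getD_add_one_eq_counter positions]
  rfl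

-- ===== VERDICT (by name: the statement is the Claim_ definition above) =====
theorem find_the_same_position_spec : Claim_equal_find_the_same_position := by
  intro positions shapes _
  unfold Spec_find_the_same_position
  exact a_eq_b positions shapes
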